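-- pv_equiv track=rewrite | github.com/omri24/AudioGenRL | audio_tools.py | remove_risky_notes
-- ===== SOURCE A (Python) =====
-- from copy import deepcopy
--
-- def remove_risky_notes(notes_lst):
--     lst_copy = deepcopy(notes_lst)
--     idx_to_remove = []
--     for i, item in enumerate(lst_copy):
--         if item + 1 in lst_copy or item - 1 in lst_copy:
--             idx_to_remove.append(i)
--     idx_to_remove.sort(reverse=True)
--     for idx in idx_to_remove:
--         temp_var = lst_copy.pop(idx)
--     return lst_copy
-- ===== SOURCE B (Python) =====
-- from copy import deepcopy
--
-- def remove_risky_notes(notes_lst):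
--     values = set(notes_lst)
--     risky = {v for v in values if v - 1 in values or v + 1 in values}
--     return deepcopy([x for x in notes_lst if x not in risky])
-- ===== Notes on version B (the rewrite author's own statement) =====
-- stated objective: faster
-- what changed: Replaces A's quadratic index-collect / reverse-sort / pop-in-reverse pipeline with a set of values, a separate pass deriving the 'risky values' table, and a single filter pass over the input.
import Mathlib
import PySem

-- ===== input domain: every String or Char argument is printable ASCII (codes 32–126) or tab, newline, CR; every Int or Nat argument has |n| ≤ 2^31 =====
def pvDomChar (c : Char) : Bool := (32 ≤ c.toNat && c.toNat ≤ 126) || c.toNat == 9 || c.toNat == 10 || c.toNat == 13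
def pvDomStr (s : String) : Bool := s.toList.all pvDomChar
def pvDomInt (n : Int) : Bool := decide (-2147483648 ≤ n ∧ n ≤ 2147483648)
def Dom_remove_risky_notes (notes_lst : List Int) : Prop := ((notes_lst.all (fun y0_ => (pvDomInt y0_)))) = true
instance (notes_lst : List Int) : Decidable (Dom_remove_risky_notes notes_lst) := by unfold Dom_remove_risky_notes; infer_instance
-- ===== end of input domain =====

-- B replaces A's index-collect / reverse-sort / pop-in-reverse pipeline by a risky-value
-- table built from a set, followed by one filter pass (objective: faster).
-- deepcopy is the identity on lists of ints, so it is ported as the identity.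

-- ===== PORT A =====
def remove_risky_notes (notes_lst : List Int) : List Int :=
  let lst_copy := notes_lst
  let idx_to_remove : List Int :=
    (PySem.List.enumerate lst_copy 0).foldl
      (fun acc pr => if pr.2 + 1 ∈ lst_copy ∨ pr.2 - 1 ∈ lst_copy then acc ++ [pr.1] else acc) []
  let idx_sorted := PySem.List.sorted idx_to_remove (fun x => x) true
  idx_sorted.foldl
    (fun cur idx => match PySem.List.pop? cur idx with
      | some r => r.2
      | none => cur)   -- none is unreachable: every collected index is in range
    lst_copy

-- ===== PORT B =====
def remove_risky_notes_alt (notes_lst : List Int) : List Int :=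
  let values := PySem.Set.ofList notes_lst
  let risky := PySem.Set.ofList (values.filter (fun v => v - 1 ∈ values ∨ v + 1 ∈ values))
  notes_lst.filter (fun x => ¬ x ∈ risky)

-- ===== PRECONDITION & SPEC =====
def Spec_remove_risky_notes (notes_lst : List Int) (out : List Int) : Prop := out = remove_risky_notes_alt notes_lst
instance (notes_lst : List Int) (out : List Int) : Decidable (Spec_remove_risky_notes notes_lst out) := by unfold Spec_remove_risky_notes; infer_instance

-- ===== CLAIM (what is proved, stated in full; the proofs are below) =====
def Claim_equal_remove_risky_notes : Prop := ∀ (notes_lst : List Int), Dom_remove_risky_notes notes_lst → Spec_remove_risky_notes notes_lst (remove_risky_notes notes_lst)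

-- ===== LEMMAS AND PROOFS =====

-- the element-wise removal condition both programs decide
def riskyCond (l : List Int) (x : Int) : Bool := decide (x + 1 ∈ l) || decide (x - 1 ∈ l)

-- A's loop step on the pop fold
def popStep (cur : List Int) (idx : Int) : List Int :=
  match PySem.List.pop? cur idx with
  | some r => r.2
  | none => cur

-- the ascending index list A collects, for a general condition
def idxList (c : Int → Bool) (l : List Int) : List Int :=
  ((PySem.List.enumerate l 0).filter (fun pr => c pr.2)).map (·.1)

theorem enumerate_shift (xs : List Int) (s : Int) :
    PySem.List.enumerate xs (s + 1) = (PySem.List.enumerate xs s).map (fun pr => (pr.1 + 1, pr.2)) := by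
  induction xs generalizing s with
  | nil => simp [PySem.List.enumerate]
  | cons x t ih => simp only [PySem.List.enumerate_cons, ih, List.map_cons]

theorem pop?_none_of_ge (xs : List Int) (i : Int) (h : 0 ≤ i) (h2 : (xs.length : Int) ≤ i) :
    PySem.List.pop? xs i = none := by
  simp only [PySem.List.pop?, PySem.List.pyIdx?]
  split_ifs with h1 <;> simp_all <;> omega

theorem popStep_shift (x : Int) (xs : List Int) (j : Int) (hj : 0 ≤ j) :
    popStep (x :: xs) (j + 1) = x :: popStep xs j := by
  unfold popStep
  by_cases h : j < (xs.length : Int)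
  · have hn : j = ((j.toNat : Nat) : Int) := by omega
    have h1 : j.toNat < xs.length := by omega
    have h2 : j.toNat + 1 < (x :: xs).length := by simp; omega
    rw [hn]
    have e1 := PySem.List.pop?_natCast xs j.toNat h1
    have e2 := PySem.List.pop?_natCast (x :: xs) (j.toNat + 1) h2
    have : ((j.toNat : Int) + 1) = ((j.toNat + 1 : Nat) : Int) := by push_cast; ring
    rw [this, e2, e1]
    simp
  · rw [pop?_none_of_ge xs j hj (by omega),
        pop?_none_of_ge (x :: xs) (j + 1) (by omega) (by simp; omega)]

theorem foldl_popStep_shift (x : Int) (js : List Int) :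
    ∀ xs : List Int, (∀ j ∈ js, 0 ≤ j) →
    (js.map (· + 1)).foldl popStep (x :: xs) = x :: js.foldl popStep xs := by
  induction js with
  | nil => intro xs _; rfl
  | cons j t ih =>
      intro xs h
      simp only [List.map_cons, List.foldl_cons]
      rw [popStep_shift x xs j (h j (by simp))]
      exact ih (popStep xs j) (fun a ha => h a (by simp [ha]))

theorem idxList_nonneg (c : Int → Bool) (l : List Int) : ∀ j ∈ idxList c l, 0 ≤ j := by
  intro j hj
  unfold idxList at hj
  obtain ⟨pr, hpr, rfl⟩ := List.mem_map.mp hj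
  have := List.mem_filter.mp hpr
  obtain ⟨k, hk, rfl⟩ := (PySem.List.mem_enumerate_iff _ _ _).mp this.1
  simp

theorem idxList_cons (c : Int → Bool) (x : Int) (xs : List Int) :
    idxList c (x :: xs) = (if c x then [(0 : Int)] else []) ++ (idxList c xs).map (· + 1) := by
  unfold idxList
  rw [PySem.List.enumerate_cons, enumerate_shift xs 0]
  rw [List.filter_cons, List.filter_map]
  split_ifs with hc <;> simp [Function.comp_def]

theorem idxList_pairwise (c : Int → Bool) (l : List Int) :
    (idxList c l).Pairwise (· < ·) := by
  unfold idxList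
  have h := PySem.List.pairwise_lt_enumerate l (0 : Int)
  exact (List.Pairwise.sublist List.filter_sublist h).map _ (fun _ _ h => h)

-- folding the pops over the reversed index list is filtering out the condition
theorem foldl_pop_idxList (c : Int → Bool) (l : List Int) :
    ((idxList c l).reverse).foldl popStep l = l.filter (fun x => ! c x) := by
  induction l with
  | nil => simp [idxList, PySem.List.enumerate]
  | cons x xs ih =>
      rw [idxList_cons, List.reverse_append, List.foldl_append, ← List.map_reverse]
      rw [foldl_popStep_shift x _ xs
        (fun j hj => idxList_nonneg c xs j (List.mem_reverse.mp hj)), ih]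
      by_cases hc : c x
      · simp [hc, popStep, PySem.List.pop?_zero_cons]
      · simp [hc]

-- A equals the filter
theorem portA_eq_filter (l : List Int) :
    remove_risky_notes l = l.filter (fun x => ! riskyCond l x) := by
  unfold remove_risky_notes
  dsimp only
  have hfun : (fun (acc : List Int) (pr : Int × Int) =>
        if pr.2 + 1 ∈ l ∨ pr.2 - 1 ∈ l then acc ++ [pr.1] else acc)
      = (fun acc pr => if (fun pr : Int × Int => riskyCond l pr.2) pr then acc ++ [pr.1] else acc) := by
    funext acc pr
    simp [riskyCond]
  rw [hfun, PySem.List.foldl_append_if (fun pr : Int × Int => riskyCond l pr.2) (·.1)]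
  have hidx : ([] : List Int) ++ ((PySem.List.enumerate l 0).filter
        (fun pr : Int × Int => riskyCond l pr.2)).map (·.1)
      = idxList (fun x => riskyCond l x) l := by
    simp [idxList]
  rw [hidx]
  rw [PySem.List.sorted_rev_eq_of_perm_of_pairwise_gt _ ((idxList (fun x => riskyCond l x) l).reverse) (fun x => x)
        (List.reverse_perm _) (by simpa [List.pairwise_reverse] using idxList_pairwise (fun x => riskyCond l x) l)]
  exact foldl_pop_idxList (fun x => riskyCond l x) l

-- B equals the filter
theorem portB_eq_filter (l : List Int) :
    remove_risky_notes_alt l = l.filter (fun x => ! riskyCond l x) := by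
  unfold remove_risky_notes_alt
  apply List.filter_congr
  intro x hx
  simp [PySem.Set.mem_ofList, List.mem_filter, riskyCond, hx, Bool.and_comm]

-- ===== VERDICT (by name: the statement is the Claim_ definition above) =====
theorem remove_risky_notes_spec : Claim_equal_remove_risky_notes := by
  intro l _
  unfold Spec_remove_risky_notes
  rw [portA_eq_filter, portB_eq_filter]
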